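-- pv_equiv track=rewrite | github.com/KaziRifatAlMuin/Knight-Invasion-Game | game/rules.py | can_place_two_blocks
-- ===== SOURCE A (Python) =====
-- from collections import deque
--
-- BOARD_SIZE = 9
--
-- KNIGHT_DIRS = [
--     (2, 1), (2, -1), (-2, 1), (-2, -1),
--     (1, 2), (1, -2), (-1, 2), (-1, -2)
-- ]
--
-- def in_bounds(r, c):
--     return 0 <= r < BOARD_SIZE and 0 <= c < BOARD_SIZE
--
-- def is_valid_cell(r, c, blocks, fires, opponent):
--     return (
--         in_bounds(r, c)
--         and (r, c) not in blocks
--         and (r, c) not in fires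
--         and (r, c) != opponent
--     )
--
-- def has_valid_path(start, target_row, opponent, blocks, fires):
--     visited = set([start])
--     queue = deque([start])
--
--     while queue:
--         r, c = queue.popleft()
--
--         if r == target_row:
--             return True
--
--         for dr, dc in KNIGHT_DIRS:
--             nr, nc = r + dr, c + dc
--
--             if (nr, nc) not in visited and is_valid_cell(nr, nc, blocks, fires, opponent):
--                 visited.add((nr, nc))
--                 queue.append((nr, nc))
--
--     return False
--
-- def can_place_two_blocks(blocks, fires, p1, p2, c1, c2):
--     if c1 == c2:
--         return False
--
--     for cell in [c1, c2]:
--         if (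
--             cell in blocks
--             or cell in fires
--             or cell == p1
--             or cell == p2
--         ):
--             return False
--
--     temp_blocks = blocks.union({c1, c2})
--
--     # MUST keep paths for BOTH players
--     if not has_valid_path(p1, BOARD_SIZE - 1, p2, temp_blocks, fires):
--         return False
--
--     if not has_valid_path(p2, 0, p1, temp_blocks, fires):
--         return False
--
--     return True
-- ===== SOURCE B (Python) =====
-- # B: same guard logic and validity predicate, but has_valid_path computes the
-- # reachable set by frontier saturation (level-set expansion, no queue) and
-- # checks the target row at the end.
--
-- BOARD_SIZE = 9
--
-- KNIGHT_DIRS = [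
--     (2, 1), (2, -1), (-2, 1), (-2, -1),
--     (1, 2), (1, -2), (-1, 2), (-1, -2)
-- ]
--
-- def in_bounds(r, c):
--     return 0 <= r < BOARD_SIZE and 0 <= c < BOARD_SIZE
--
-- def is_valid_cell(r, c, blocks, fires, opponent):
--     return (
--         in_bounds(r, c)
--         and (r, c) not in blocks
--         and (r, c) not in fires
--         and (r, c) != opponent
--     )
--
-- def has_valid_path(start, target_row, opponent, blocks, fires):
--     reached = {start}
--     # the reachable set has at most 81 in-bounds cells plus the start,
--     # so that many rounds always suffice to saturate
--     for _ in range(BOARD_SIZE * BOARD_SIZE + 1):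
--         frontier = {
--             (r + dr, c + dc)
--             for (r, c) in reached
--             for (dr, dc) in KNIGHT_DIRS
--             if (r + dr, c + dc) not in reached
--             and is_valid_cell(r + dr, c + dc, blocks, fires, opponent)
--         }
--         if not frontier:
--             break
--         reached |= frontier
--     return any(r == target_row for (r, c) in reached)
--
-- def can_place_two_blocks(blocks, fires, p1, p2, c1, c2):
--     if c1 == c2 or any(
--         cell in blocks or cell in fires or cell == p1 or cell == p2
--         for cell in (c1, c2)
--     ):
--         return False
--     temp_blocks = set(blocks) | {c1, c2}
--     return all(
--         has_valid_path(p, row, opp, temp_blocks, fires)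
--         for p, row, opp in ((p1, BOARD_SIZE - 1, p2), (p2, 0, p1))
--     )
-- ===== Notes on version B (the rewrite author's own statement) =====
-- stated objective: alternative
-- what changed: has_valid_path's queue-based BFS with early exit on pop is replaced by frontier saturation: repeatedly expand the whole reached set by one knight-move layer until no new cell appears, then scan the reached set once for the target row; the guard logic is folded into one any/all expression.
import Mathlib
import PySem

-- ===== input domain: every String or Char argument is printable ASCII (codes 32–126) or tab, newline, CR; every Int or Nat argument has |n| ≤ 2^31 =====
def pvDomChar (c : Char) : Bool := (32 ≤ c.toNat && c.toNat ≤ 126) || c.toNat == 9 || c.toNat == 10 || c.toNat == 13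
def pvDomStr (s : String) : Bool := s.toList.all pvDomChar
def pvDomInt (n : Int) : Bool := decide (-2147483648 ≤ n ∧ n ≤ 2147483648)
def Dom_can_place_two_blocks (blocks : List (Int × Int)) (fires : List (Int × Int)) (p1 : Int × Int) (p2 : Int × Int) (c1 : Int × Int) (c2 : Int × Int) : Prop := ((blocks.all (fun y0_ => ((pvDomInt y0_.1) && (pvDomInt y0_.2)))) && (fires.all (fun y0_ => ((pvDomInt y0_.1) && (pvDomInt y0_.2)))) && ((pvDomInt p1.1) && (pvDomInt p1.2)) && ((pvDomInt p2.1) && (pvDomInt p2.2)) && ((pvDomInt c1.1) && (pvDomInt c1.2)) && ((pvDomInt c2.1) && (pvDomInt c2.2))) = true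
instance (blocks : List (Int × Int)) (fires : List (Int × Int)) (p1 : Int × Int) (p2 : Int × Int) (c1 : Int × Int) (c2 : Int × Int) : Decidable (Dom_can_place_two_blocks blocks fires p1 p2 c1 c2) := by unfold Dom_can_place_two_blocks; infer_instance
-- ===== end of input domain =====

-- B replaces the queue-based BFS inside has_valid_path by frontier saturation (expand the
-- whole reached set layer by layer until a fixpoint, then scan it once for the target row);
-- the guard logic and the validity predicate are unchanged. Objective: alternative.

-- shared constants/helpers (identical lines in both Python sources)
def pvKnightDirs : List (Int × Int) :=
  [(2, 1), (2, -1), (-2, 1), (-2, -1), (1, 2), (1, -2), (-1, 2), (-1, -2)]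

def pv_in_bounds (r c : Int) : Bool := decide (0 ≤ r ∧ r < 9 ∧ 0 ≤ c ∧ c < 9)

def pv_is_valid_cell (r c : Int) (blocks fires : List (Int × Int)) (opponent : Int × Int) : Bool :=
  pv_in_bounds r c && !(blocks.contains (r, c)) && !(fires.contains (r, c)) && !((r, c) == opponent)

-- ===== PORT A =====
-- A's while-queue BFS; `fuel` is only a totality guard (the loop pops each visited cell at
-- most once, so 200 fuel is never exhausted — proved inside pvBfs_main below).
-- body of A's inner `for dr, dc in KNIGHT_DIRS` loop (visited, queue threaded as a pair)
def pvBfsStep (valid : Int × Int → Bool) (x : Int × Int)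
    (vq : List (Int × Int) × List (Int × Int)) (d : Int × Int) :
    List (Int × Int) × List (Int × Int) :=
  let n := (x.1 + d.1, x.2 + d.2)
  if !(vq.1.contains n) && valid n then (vq.1 ++ [n], vq.2 ++ [n]) else vq

def pvBfs (valid : Int × Int → Bool) (target : Int) :
    Nat → List (Int × Int) → List (Int × Int) → Bool
  | 0, _, _ => false
  | _ + 1, _, [] => false
  | fuel + 1, visited, x :: queue =>
    if x.1 = target then true
    else
      let vq := pvKnightDirs.foldl (pvBfsStep valid x) (visited, queue)
      pvBfs valid target fuel vq.1 vq.2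

def pv_has_valid_path (start : Int × Int) (target_row : Int) (opponent : Int × Int)
    (blocks fires : List (Int × Int)) : Bool :=
  pvBfs (fun n => pv_is_valid_cell n.1 n.2 blocks fires opponent) target_row 200 [start] [start]

def can_place_two_blocks (blocks : List (Int × Int)) (fires : List (Int × Int)) (p1 : Int × Int) (p2 : Int × Int) (c1 : Int × Int) (c2 : Int × Int) : Bool :=
  if c1 == c2 then false
  else if blocks.contains c1 || fires.contains c1 || c1 == p1 || c1 == p2 then false
  else if blocks.contains c2 || fires.contains c2 || c2 == p1 || c2 == p2 then false
  else
    let temp_blocks := PySem.Set.union blocks (PySem.Set.ofList [c1, c2])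
    if !(pv_has_valid_path p1 8 p2 temp_blocks fires) then false
    else if !(pv_has_valid_path p2 0 p1 temp_blocks fires) then false
    else true

-- ===== PORT B =====
-- one saturation round: the set of valid knight-move neighbours of `reached` not yet reached
-- body of B's set comprehension, accumulating the frontier for one source cell / one move
def pvFrontierStep (valid : Int × Int → Bool) (reached : List (Int × Int)) (p : Int × Int)
    (acc : List (Int × Int)) (d : Int × Int) : List (Int × Int) :=
  let n := (p.1 + d.1, p.2 + d.2)
  if !(reached.contains n) && valid n && !(acc.contains n) then acc ++ [n] else acc

def pvFrontier (valid : Int × Int → Bool) (reached : List (Int × Int)) : List (Int × Int) :=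
  reached.foldl
    (fun acc p => pvKnightDirs.foldl (pvFrontierStep valid reached p) acc)
    []

def pvSat (valid : Int × Int → Bool) (target : Int) :
    Nat → List (Int × Int) → Bool
  | 0, reached => reached.any (fun p => p.1 == target)
  | n + 1, reached =>
    let f := pvFrontier valid reached
    if f.isEmpty then reached.any (fun p => p.1 == target)
    else pvSat valid target n (reached ++ f)

def pv_has_valid_path_alt (start : Int × Int) (target_row : Int) (opponent : Int × Int)
    (blocks fires : List (Int × Int)) : Bool :=
  pvSat (fun n => pv_is_valid_cell n.1 n.2 blocks fires opponent) target_row 82 [start]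

def can_place_two_blocks_alt (blocks : List (Int × Int)) (fires : List (Int × Int)) (p1 : Int × Int) (p2 : Int × Int) (c1 : Int × Int) (c2 : Int × Int) : Bool :=
  if c1 == c2
      || (blocks.contains c1 || fires.contains c1 || c1 == p1 || c1 == p2)
      || (blocks.contains c2 || fires.contains c2 || c2 == p1 || c2 == p2) then false
  else
    let temp_blocks := PySem.Set.union (PySem.Set.ofList blocks) (PySem.Set.ofList [c1, c2])
    pv_has_valid_path_alt p1 8 p2 temp_blocks fires
      && pv_has_valid_path_alt p2 0 p1 temp_blocks fires

-- ===== PRECONDITION & SPEC =====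
def Spec_can_place_two_blocks (blocks : List (Int × Int)) (fires : List (Int × Int)) (p1 : Int × Int) (p2 : Int × Int) (c1 : Int × Int) (c2 : Int × Int) (out : Bool) : Prop := out = can_place_two_blocks_alt blocks fires p1 p2 c1 c2
instance (blocks : List (Int × Int)) (fires : List (Int × Int)) (p1 : Int × Int) (p2 : Int × Int) (c1 : Int × Int) (c2 : Int × Int) (out : Bool) : Decidable (Spec_can_place_two_blocks blocks fires p1 p2 c1 c2 out) := by unfold Spec_can_place_two_blocks; infer_instance

-- ===== CLAIM (what is proved, stated in full; the proofs are below) =====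
def Claim_equal_can_place_two_blocks : Prop := ∀ (blocks : List (Int × Int)) (fires : List (Int × Int)) (p1 : Int × Int) (p2 : Int × Int) (c1 : Int × Int) (c2 : Int × Int), Dom_can_place_two_blocks blocks fires p1 p2 c1 c2 → Spec_can_place_two_blocks blocks fires p1 p2 c1 c2 (can_place_two_blocks blocks fires p1 p2 c1 c2)

-- ===== LEMMAS AND PROOFS =====

-- the 81 board cells
def pvBoard : List (Int × Int) :=
  (List.range 9).flatMap (fun r => (List.range 9).map (fun c => ((r : Int), (c : Int))))

lemma mem_pvBoard {p : Int × Int} (h : pv_in_bounds p.1 p.2 = true) : p ∈ pvBoard := by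
  simp only [pv_in_bounds, decide_eq_true_eq] at h
  simp only [pvBoard, List.mem_flatMap, List.mem_map]
  refine ⟨p.1.toNat, ?_, p.2.toNat, ?_, ?_⟩
  · simp only [List.pure_def, List.bind_eq_flatMap, List.mem_flatMap, List.mem_range,
      List.mem_singleton]
    exact ⟨p.1.toNat, by omega, rfl⟩
  · simp only [List.pure_def, List.bind_eq_flatMap, List.mem_flatMap, List.mem_range,
      List.mem_singleton]
    exact ⟨p.2.toNat, by omega, rfl⟩
  · obtain ⟨a, b⟩ := p
    obtain ⟨h1, h2, h3, h4⟩ := h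
    simp only [Prod.mk.injEq]
    constructor <;> omega

lemma length_le_of_sub_board {start : Int × Int} {v : List (Int × Int)}
    (hnd : v.Nodup) (hb : ∀ p ∈ v, p = start ∨ p ∈ pvBoard) : v.length ≤ 82 := by
  have hsub : v ⊆ start :: pvBoard := by
    intro p hp
    rcases hb p hp with h | h
    · simp [h]
    · exact List.mem_cons_of_mem _ h
  have := (hnd.subperm hsub).length_le
  simpa [pvBoard] using this

-- knight-move reachability through valid cells
inductive pvReach (valid : Int × Int → Bool) (start : Int × Int) : Int × Int → Prop
  | refl : pvReach valid start start
  | step {q : Int × Int} (d : Int × Int) : pvReach valid start q → d ∈ pvKnightDirs →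
      valid (q.1 + d.1, q.2 + d.2) = true → pvReach valid start (q.1 + d.1, q.2 + d.2)

lemma pvReach_subset {valid : Int × Int → Bool} {start : Int × Int} {S : List (Int × Int)}
    (hs : start ∈ S)
    (hcl : ∀ p ∈ S, ∀ d ∈ pvKnightDirs, valid (p.1 + d.1, p.2 + d.2) = true →
      (p.1 + d.1, p.2 + d.2) ∈ S) :
    ∀ q, pvReach valid start q → q ∈ S := by
  intro q hq
  induction hq with
  | refl => exact hs
  | step d hr hd hv ih => exact hcl _ ih d hd hv

-- the result of A's inner for-loop over the knight directions
lemma pvBfs_fold_spec (valid : Int × Int → Bool) (x : Int × Int) :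
    ∀ (ds : List (Int × Int)) (v q : List (Int × Int)),
      ∃ ext,
        List.foldl (pvBfsStep valid x) (v, q) ds = (v ++ ext, q ++ ext)
        ∧ ext.Nodup
        ∧ (∀ n ∈ ext, n ∉ v ∧ valid n = true ∧ ∃ d ∈ ds, n = (x.1 + d.1, x.2 + d.2))
        ∧ (∀ d ∈ ds, valid (x.1 + d.1, x.2 + d.2) = true → (x.1 + d.1, x.2 + d.2) ∈ v ++ ext) := by
  intro ds
  induction ds with
  | nil => exact fun v q => ⟨[], by simp, by simp, by simp, by simp⟩
  | cons d ds ih =>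
    intro v q
    rw [List.foldl_cons]
    by_cases hc : (!(v.contains (x.1 + d.1, x.2 + d.2)) && valid (x.1 + d.1, x.2 + d.2)) = true
    · have hstep : pvBfsStep valid x (v, q) d
          = (v ++ [(x.1 + d.1, x.2 + d.2)], q ++ [(x.1 + d.1, x.2 + d.2)]) := by
        simp only [pvBfsStep, hc, if_true]
      rw [hstep]
      obtain ⟨ext, heq, hnd, hprop, hcov⟩ := ih (v ++ [(x.1 + d.1, x.2 + d.2)]) (q ++ [(x.1 + d.1, x.2 + d.2)])
      simp only [Bool.and_eq_true, Bool.not_eq_true', List.contains_eq_mem, decide_eq_false_iff_not] at hc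
      refine ⟨(x.1 + d.1, x.2 + d.2) :: ext, by simpa using heq, ?_, ?_, ?_⟩
      · refine List.nodup_cons.mpr ⟨fun hmem => ?_, hnd⟩
        exact (hprop _ hmem).1 (by simp)
      · intro n hn
        rcases List.mem_cons.mp hn with rfl | hn
        · exact ⟨hc.1, hc.2, d, by simp⟩
        · obtain ⟨hnv, hval, d', hd', hde⟩ := hprop n hn
          exact ⟨fun h => hnv (by simp [h]), hval, d', by simp [hd'], hde⟩
      · intro d' hd' hval
        rcases List.mem_cons.mp hd' with rfl | hd'
        · simp
        · have := hcov d' hd' hval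
          simpa [List.append_assoc] using this
    · have hstep : pvBfsStep valid x (v, q) d = (v, q) := by
        simp only [pvBfsStep]
        rw [if_neg (by simpa using hc)]
      rw [hstep]
      obtain ⟨ext, heq, hnd, hprop, hcov⟩ := ih v q
      refine ⟨ext, heq, hnd, ?_, ?_⟩
      · intro n hn
        obtain ⟨hnv, hval, d', hd', hde⟩ := hprop n hn
        exact ⟨hnv, hval, d', by simp [hd'], hde⟩
      · intro d' hd' hval
        rcases List.mem_cons.mp hd' with rfl | hd'
        · simp only [Bool.and_eq_true, Bool.not_eq_true', List.contains_eq_mem,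
            decide_eq_false_iff_not, not_and] at hc
          have : (x.1 + d'.1, x.2 + d'.2) ∈ v := by
            by_contra hnv
            exact absurd hval (by simp [hc hnv])
          exact List.mem_append.mpr (Or.inl this)
        · exact hcov d' hd' hval

-- loop invariant of A's BFS
def pvInv (valid : Int × Int → Bool) (start : Int × Int) (target : Int)
    (v q : List (Int × Int)) : Prop :=
  v.Nodup ∧ q.Nodup ∧ start ∈ v ∧ (∀ p ∈ q, p ∈ v) ∧ (∀ p ∈ v, pvReach valid start p) ∧
  (∀ p ∈ v, p = start ∨ p ∈ pvBoard) ∧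
  (∀ p ∈ v, p ∉ q → p.1 ≠ target ∧
    ∀ d ∈ pvKnightDirs, valid (p.1 + d.1, p.2 + d.2) = true → (p.1 + d.1, p.2 + d.2) ∈ v)

lemma pvBfs_main {valid : Int × Int → Bool} {start : Int × Int} {target : Int}
    (hval : ∀ n, valid n = true → n ∈ pvBoard) :
    ∀ (fuel : Nat) (v q : List (Int × Int)), pvInv valid start target v q →
      164 + q.length ≤ fuel + 2 * v.length →
      (pvBfs valid target fuel v q = true ↔ ∃ x, pvReach valid start x ∧ x.1 = target) := by
  intro fuel
  induction fuel with
  | zero =>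
    intro v q hinv hb
    obtain ⟨hndv, hndq, hstart, hqv, hreach, hboard, hproc⟩ := hinv
    have hcard := length_le_of_sub_board hndv hboard
    have hq : q = [] := by
      cases q with
      | nil => rfl
      | cons a t => exfalso; simp only [List.length_cons] at hb; omega
    subst hq
    simp only [pvBfs, Bool.false_eq_true, false_iff]
    rintro ⟨x, hx, ht⟩
    have hxv := pvReach_subset hstart
      (fun p hp d hd hv => (hproc p hp (List.not_mem_nil)).2 d hd hv) x hx
    exact (hproc x hxv (List.not_mem_nil)).1 ht
  | succ fuel ih =>
    intro v q hinv hb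
    obtain ⟨hndv, hndq, hstart, hqv, hreach, hboard, hproc⟩ := hinv
    cases q with
    | nil =>
      simp only [pvBfs, Bool.false_eq_true, false_iff]
      rintro ⟨x, hx, ht⟩
      have hxv := pvReach_subset hstart
        (fun p hp d hd hv => (hproc p hp (List.not_mem_nil)).2 d hd hv) x hx
      exact (hproc x hxv (List.not_mem_nil)).1 ht
    | cons x t =>
      by_cases hx : x.1 = target
      · simp only [pvBfs, hx, if_true, true_iff]
        exact ⟨x, hreach x (hqv x (List.mem_cons_self)), hx⟩
      · obtain ⟨ext, heq, hnde, hprop, hcov⟩ := pvBfs_fold_spec valid x pvKnightDirs v t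
        have hxv : x ∈ v := hqv x (List.mem_cons_self)
        have hstep : pvBfs valid target (fuel + 1) v (x :: t)
            = pvBfs valid target fuel (v ++ ext) (t ++ ext) := by
          simp only [pvBfs, hx, if_false, heq]
        rw [hstep]
        have hext : ∀ n ∈ ext, n ∉ v ∧ valid n = true ∧
            ∃ d ∈ pvKnightDirs, n = (x.1 + d.1, x.2 + d.2) := hprop
        have htv : ∀ p ∈ t, p ∈ v := fun p hp => hqv p (List.mem_cons_of_mem _ hp)
        have hndt : t.Nodup := (List.nodup_cons.mp hndq).2
        have hxt : x ∉ t := (List.nodup_cons.mp hndq).1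
        refine ih (v ++ ext) (t ++ ext) ⟨?_, ?_, ?_, ?_, ?_, ?_, ?_⟩ ?_
        · refine List.nodup_append.mpr ⟨hndv, hnde, ?_⟩
          intro a ha b hb2 heq2
          subst heq2
          exact (hext a hb2).1 ha
        · refine List.nodup_append.mpr ⟨hndt, hnde, ?_⟩
          intro a ha b hb2 heq2
          subst heq2
          exact (hext a hb2).1 (htv a ha)
        · exact List.mem_append.mpr (Or.inl hstart)
        · intro p hp
          rcases List.mem_append.mp hp with hp | hp
          · exact List.mem_append.mpr (Or.inl (htv p hp))
          · exact List.mem_append.mpr (Or.inr hp)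
        · intro p hp
          rcases List.mem_append.mp hp with hp | hp
          · exact hreach p hp
          · obtain ⟨_, hval, d, hd, hde⟩ := hext p hp
            exact hde ▸ pvReach.step d (hreach x hxv) hd (hde ▸ hval)
        · intro p hp
          rcases List.mem_append.mp hp with hp | hp
          · exact hboard p hp
          · exact Or.inr (hval p (hext p hp).2.1)
        · intro p hp hpq
          have hpext : p ∉ ext := fun h => hpq (List.mem_append.mpr (Or.inr h))
          have hpt : p ∉ t := fun h => hpq (List.mem_append.mpr (Or.inl h))
          have hpv : p ∈ v := by
            rcases List.mem_append.mp hp with h | h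
            · exact h
            · exact absurd h hpext
          by_cases hpx : p = x
          · subst hpx
            refine ⟨hx, fun d hd hv => ?_⟩
            exact hcov d hd hv
          · have := hproc p hpv (by simp [hpt, hpx])
            exact ⟨this.1, fun d hd hv => List.mem_append.mpr (Or.inl (this.2 d hd hv))⟩
        · simp only [List.length_append, List.length_cons] at hb ⊢
          omega

-- the result of B's frontier comprehension, inner fold (one source cell)
lemma pvFrontier_inner (valid : Int × Int → Bool) (reached : List (Int × Int)) (p : Int × Int) :
    ∀ (ds : List (Int × Int)) (acc : List (Int × Int)),
      ∃ ext,
        List.foldl (pvFrontierStep valid reached p) acc ds = acc ++ ext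
        ∧ ext.Nodup
        ∧ (∀ n ∈ ext, n ∉ acc ∧ n ∉ reached ∧ valid n = true ∧
            ∃ d ∈ ds, n = (p.1 + d.1, p.2 + d.2))
        ∧ (∀ d ∈ ds, (p.1 + d.1, p.2 + d.2) ∉ reached → valid (p.1 + d.1, p.2 + d.2) = true →
            (p.1 + d.1, p.2 + d.2) ∈ acc ++ ext) := by
  intro ds
  induction ds with
  | nil => exact fun acc => ⟨[], by simp, by simp, by simp, by simp⟩
  | cons d ds ih =>
    intro acc
    rw [List.foldl_cons]
    by_cases hc : (!(reached.contains (p.1 + d.1, p.2 + d.2)) && valid (p.1 + d.1, p.2 + d.2)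
        && !(acc.contains (p.1 + d.1, p.2 + d.2))) = true
    · have hstep : pvFrontierStep valid reached p acc d = acc ++ [(p.1 + d.1, p.2 + d.2)] := by
        simp only [pvFrontierStep, hc, if_true]
      rw [hstep]
      obtain ⟨ext, heq, hnd, hprop, hcov⟩ := ih (acc ++ [(p.1 + d.1, p.2 + d.2)])
      simp only [Bool.and_eq_true, Bool.not_eq_true', List.contains_eq_mem,
        decide_eq_false_iff_not] at hc
      refine ⟨(p.1 + d.1, p.2 + d.2) :: ext, by simpa using heq, ?_, ?_, ?_⟩
      · refine List.nodup_cons.mpr ⟨fun hmem => ?_, hnd⟩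
        exact (hprop _ hmem).1 (by simp)
      · intro n hn
        rcases List.mem_cons.mp hn with rfl | hn
        · exact ⟨hc.2, hc.1.1, hc.1.2, d, by simp⟩
        · obtain ⟨hna, hnr, hval, d', hd', hde⟩ := hprop n hn
          exact ⟨fun h => hna (by simp [h]), hnr, hval, d', by simp [hd'], hde⟩
      · intro d' hd' hnr hval
        rcases List.mem_cons.mp hd' with rfl | hd'
        · simp
        · simpa [List.append_assoc] using hcov d' hd' hnr hval
    · have hstep : pvFrontierStep valid reached p acc d = acc := by
        simp only [pvFrontierStep]
        rw [if_neg (by simpa using hc)]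
      rw [hstep]
      obtain ⟨ext, heq, hnd, hprop, hcov⟩ := ih acc
      refine ⟨ext, heq, hnd, ?_, ?_⟩
      · intro n hn
        obtain ⟨hna, hnr, hval, d', hd', hde⟩ := hprop n hn
        exact ⟨hna, hnr, hval, d', by simp [hd'], hde⟩
      · intro d' hd' hnr hval
        rcases List.mem_cons.mp hd' with rfl | hd'
        · simp only [Bool.and_eq_true, Bool.not_eq_true', List.contains_eq_mem,
            decide_eq_false_iff_not, not_and] at hc
          have : (p.1 + d'.1, p.2 + d'.2) ∈ acc := by
            by_contra hna
            exact hc ⟨hnr, hval⟩ hna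
          exact List.mem_append.mpr (Or.inl this)
        · exact hcov d' hd' hnr hval

-- the result of B's frontier comprehension, outer fold
lemma pvFrontier_outer (valid : Int × Int → Bool) (reached : List (Int × Int)) :
    ∀ (ps acc : List (Int × Int)),
      ∃ ext,
        List.foldl
          (fun acc p => pvKnightDirs.foldl (pvFrontierStep valid reached p) acc)
          acc ps = acc ++ ext
        ∧ ext.Nodup
        ∧ (∀ n ∈ ext, n ∉ acc ∧ n ∉ reached ∧ valid n = true ∧
            ∃ p ∈ ps, ∃ d ∈ pvKnightDirs, n = (p.1 + d.1, p.2 + d.2))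
        ∧ (∀ p ∈ ps, ∀ d ∈ pvKnightDirs, (p.1 + d.1, p.2 + d.2) ∉ reached →
            valid (p.1 + d.1, p.2 + d.2) = true → (p.1 + d.1, p.2 + d.2) ∈ acc ++ ext) := by
  intro ps
  induction ps with
  | nil => exact fun acc => ⟨[], by simp, by simp, by simp, by simp⟩
  | cons p ps ih =>
    intro acc
    rw [List.foldl_cons]
    obtain ⟨ext1, heq1, hnd1, hprop1, hcov1⟩ := pvFrontier_inner valid reached p pvKnightDirs acc
    rw [heq1]
    obtain ⟨ext2, heq2, hnd2, hprop2, hcov2⟩ := ih (acc ++ ext1)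
    refine ⟨ext1 ++ ext2, by simpa [List.append_assoc] using heq2, ?_, ?_, ?_⟩
    · refine List.nodup_append.mpr ⟨hnd1, hnd2, ?_⟩
      intro a ha b hb heq
      subst heq
      exact (hprop2 a hb).1 (List.mem_append.mpr (Or.inr ha))
    · intro n hn
      rcases List.mem_append.mp hn with hn | hn
      · obtain ⟨hna, hnr, hval, d', hd', hde⟩ := hprop1 n hn
        exact ⟨hna, hnr, hval, p, by simp, d', hd', hde⟩
      · obtain ⟨hna, hnr, hval, p', hp', d', hd', hde⟩ := hprop2 n hn
        exact ⟨fun h => hna (List.mem_append.mpr (Or.inl h)), hnr, hval, p', by simp [hp'],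
          d', hd', hde⟩
    · intro p' hp' d' hd' hnr hval
      rcases List.mem_cons.mp hp' with rfl | hp'
      · have := hcov1 d' hd' hnr hval
        rcases List.mem_append.mp this with h | h
        · exact List.mem_append.mpr (Or.inl h)
        · exact List.mem_append.mpr (Or.inr (List.mem_append.mpr (Or.inl h)))
      · simpa [List.append_assoc] using hcov2 p' hp' d' hd' hnr hval

def pvSinv (valid : Int × Int → Bool) (start : Int × Int) (reached : List (Int × Int)) : Prop :=
  reached.Nodup ∧ start ∈ reached ∧ (∀ p ∈ reached, pvReach valid start p) ∧
  (∀ p ∈ reached, p = start ∨ p ∈ pvBoard)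

lemma pvSat_main {valid : Int × Int → Bool} {start : Int × Int} {target : Int}
    (hval : ∀ n, valid n = true → n ∈ pvBoard) :
    ∀ (n : Nat) (reached : List (Int × Int)), pvSinv valid start reached →
      83 ≤ n + reached.length →
      (pvSat valid target n reached = true ↔ ∃ x, pvReach valid start x ∧ x.1 = target) := by
  intro n
  induction n with
  | zero =>
    intro reached hinv hb
    obtain ⟨hnd, hstart, hreach, hboard⟩ := hinv
    have hcard := length_le_of_sub_board hnd hboard
    exfalso
    omega
  | succ n ih =>
    intro reached hinv hb
    obtain ⟨hnd, hstart, hreach, hboard⟩ := hinv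
    obtain ⟨ext, heq, hnde, hprop, hcov⟩ := pvFrontier_outer valid reached reached []
    have hfr : pvFrontier valid reached = ext := by
      simpa using heq
    have hany : reached.any (fun p => p.1 == target) = true
        ↔ ∃ p ∈ reached, p.1 = target := by
      simp [List.any_eq_true]
    by_cases he : ext = []
    · have hcl : ∀ p ∈ reached, ∀ d ∈ pvKnightDirs, valid (p.1 + d.1, p.2 + d.2) = true →
          (p.1 + d.1, p.2 + d.2) ∈ reached := by
        intro p hp d hd hv
        by_contra hnr
        have := hcov p hp d hd hnr hv
        simp [he] at this
      have hstep : pvSat valid target (n + 1) reached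
          = reached.any (fun p => p.1 == target) := by
        simp only [pvSat, hfr, he, List.isEmpty_nil, if_true]
      rw [hstep, hany]
      constructor
      · rintro ⟨p, hp, ht⟩
        exact ⟨p, hreach p hp, ht⟩
      · rintro ⟨x, hx, ht⟩
        exact ⟨x, pvReach_subset hstart hcl x hx, ht⟩
    · have hstep : pvSat valid target (n + 1) reached
          = pvSat valid target n (reached ++ ext) := by
        simp only [pvSat, hfr, List.isEmpty_eq_false_iff_exists_mem.mpr
          (List.exists_mem_of_ne_nil ext he)]
        simp
      rw [hstep]
      refine ih (reached ++ ext) ⟨?_, ?_, ?_, ?_⟩ ?_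
      · refine List.nodup_append.mpr ⟨hnd, hnde, ?_⟩
        intro a ha b hb2 heq2
        subst heq2
        exact (hprop a hb2).2.1 ha
      · exact List.mem_append.mpr (Or.inl hstart)
      · intro p hp
        rcases List.mem_append.mp hp with hp | hp
        · exact hreach p hp
        · obtain ⟨_, _, hval2, p', hp', d, hd, hde⟩ := hprop p hp
          exact hde ▸ pvReach.step d (hreach p' hp') hd (hde ▸ hval2)
      · intro p hp
        rcases List.mem_append.mp hp with hp | hp
        · exact hboard p hp
        · exact Or.inr (hval p (hprop p hp).2.2.1)
      · have : 0 < ext.length := List.length_pos_of_ne_nil he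
        simp only [List.length_append] at *
        omega

lemma pv_path_eq (valid : Int × Int → Bool) (start : Int × Int) (target : Int)
    (hval : ∀ n, valid n = true → n ∈ pvBoard) :
    pvBfs valid target 200 [start] [start] = pvSat valid target 82 [start] := by
  have hinvA : pvInv valid start target [start] [start] := by
    refine ⟨by simp, by simp, by simp, by simp, ?_, ?_, ?_⟩
    · intro p hp
      rw [List.mem_singleton] at hp
      subst hp
      exact pvReach.refl
    · intro p hp
      rw [List.mem_singleton] at hp
      exact Or.inl hp
    · intro p hp hpq
      exact absurd hp hpq
  have hinvB : pvSinv valid start [start] := by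
    refine ⟨by simp, by simp, ?_, ?_⟩
    · intro p hp
      rw [List.mem_singleton] at hp
      subst hp
      exact pvReach.refl
    · intro p hp
      rw [List.mem_singleton] at hp
      exact Or.inl hp
  have hA := pvBfs_main (start := start) hval 200 [start] [start] hinvA (by simp)
  have hB := pvSat_main (start := start) (target := target) hval 82 [start] hinvB (by simp)
  rw [Bool.eq_iff_iff]
  exact hA.trans hB.symm

lemma pv_valid_board (blocks fires : List (Int × Int)) (opp : Int × Int) :
    ∀ n : Int × Int, pv_is_valid_cell n.1 n.2 blocks fires opp = true → n ∈ pvBoard := by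
  intro n h
  simp only [pv_is_valid_cell, Bool.and_eq_true] at h
  exact mem_pvBoard h.1.1.1

lemma pv_valid_ext (blocks fires : List (Int × Int)) (c1 c2 : Int × Int) (opp : Int × Int) :
    (fun n : Int × Int => pv_is_valid_cell n.1 n.2
        (PySem.Set.union blocks (PySem.Set.ofList [c1, c2])) fires opp)
      = (fun n : Int × Int => pv_is_valid_cell n.1 n.2
        (PySem.Set.union (PySem.Set.ofList blocks) (PySem.Set.ofList [c1, c2])) fires opp) := by
  have hc : ∀ n : Int × Int,
      List.contains (PySem.Set.union blocks (PySem.Set.ofList [c1, c2])) n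
        = List.contains (PySem.Set.union (PySem.Set.ofList blocks) (PySem.Set.ofList [c1, c2])) n := by
    intro n
    rw [Bool.eq_iff_iff]
    simp only [List.contains_iff_mem]
    rw [PySem.Set.mem_union blocks (PySem.Set.ofList [c1, c2]) n,
      PySem.Set.mem_union (PySem.Set.ofList blocks) (PySem.Set.ofList [c1, c2]) n,
      PySem.Set.mem_ofList blocks n]
  funext n
  obtain ⟨a, b⟩ := n
  simp only [pv_is_valid_cell, hc (a, b)]

lemma pv_path_eq' (start : Int × Int) (target : Int) (opp : Int × Int)
    (blocks fires : List (Int × Int)) (c1 c2 : Int × Int) :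
    pv_has_valid_path start target opp (PySem.Set.union blocks (PySem.Set.ofList [c1, c2])) fires
      = pv_has_valid_path_alt start target opp
        (PySem.Set.union (PySem.Set.ofList blocks) (PySem.Set.ofList [c1, c2])) fires := by
  unfold pv_has_valid_path pv_has_valid_path_alt
  rw [pv_valid_ext blocks fires c1 c2 opp]
  exact pv_path_eq _ start target
    (pv_valid_board (PySem.Set.union (PySem.Set.ofList blocks) (PySem.Set.ofList [c1, c2]))
      fires opp)

-- ===== VERDICT (by name: the statement is the Claim_ definition above) =====
theorem can_place_two_blocks_spec : Claim_equal_can_place_two_blocks := by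
  intro blocks fires p1 p2 c1 c2 _
  unfold Spec_can_place_two_blocks can_place_two_blocks can_place_two_blocks_alt
  by_cases h0 : (c1 == c2) = true
  · rw [if_pos h0, if_pos (Bool.or_inl (Bool.or_inl h0))]
  · rw [if_neg h0]
    by_cases h1 : (blocks.contains c1 || fires.contains c1 || c1 == p1 || c1 == p2) = true
    · rw [if_pos h1, if_pos (Bool.or_inl (Bool.or_inr h1))]
    · rw [if_neg h1]
      by_cases h2 : (blocks.contains c2 || fires.contains c2 || c2 == p1 || c2 == p2) = true
      · rw [if_pos h2, if_pos (Bool.or_inr h2)]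
      · have hbc : ¬((c1 == c2
            || (blocks.contains c1 || fires.contains c1 || c1 == p1 || c1 == p2)
            || (blocks.contains c2 || fires.contains c2 || c2 == p1 || c2 == p2)) = true) := by
          intro h
          rcases Bool.or_eq_true_iff.mp h with h | h
          · rcases Bool.or_eq_true_iff.mp h with h | h
            · exact h0 h
            · exact h1 h
          · exact h2 h
        rw [if_neg h2, if_neg hbc]
        show (if (!pv_has_valid_path p1 8 p2
              (PySem.Set.union blocks (PySem.Set.ofList [c1, c2])) fires) = true then false
            else if (!pv_has_valid_path p2 0 p1
              (PySem.Set.union blocks (PySem.Set.ofList [c1, c2])) fires) = true then false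
            else true)
          = (pv_has_valid_path_alt p1 8 p2
              (PySem.Set.union (PySem.Set.ofList blocks) (PySem.Set.ofList [c1, c2])) fires
            && pv_has_valid_path_alt p2 0 p1
              (PySem.Set.union (PySem.Set.ofList blocks) (PySem.Set.ofList [c1, c2])) fires)
        rw [pv_path_eq' p1 8 p2 blocks fires c1 c2, pv_path_eq' p2 0 p1 blocks fires c1 c2]
        cases hb1 : pv_has_valid_path_alt p1 8 p2
          (PySem.Set.union (PySem.Set.ofList blocks) (PySem.Set.ofList [c1, c2])) fires <;>
        cases hb2 : pv_has_valid_path_alt p2 0 p1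
          (PySem.Set.union (PySem.Set.ofList blocks) (PySem.Set.ofList [c1, c2])) fires <;>
        simp
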